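-- pv_equiv track=rewrite | github.com/onurcan-kaya/ring_analysis | ring_analysis.py | canonicalise_ring
-- ===== SOURCE A (Python) =====
-- def canonicalise_ring(atom_indices):
--     """Canonical form: lexicographically smallest rotation or reflection."""
--     n = len(atom_indices)
--     fwd = list(atom_indices)
--     rev = list(reversed(atom_indices))
--     candidates = []
--     for seq in (fwd, rev):
--         for k in range(n):
--             candidates.append(tuple(seq[k:] + seq[:k]))
--     return min(candidates)
-- ===== SOURCE B (Python) =====
-- def canonicalise_ring(atom_indices):
--     """Canonical form: lexicographically smallest rotation or reflection.
--
--     Position-wise tournament: keep the set of candidate start positions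
--     (rotation offsets of the ring and of its reflection) and eliminate, one
--     position at a time, every candidate whose next element is not minimal
--     among the survivors; after n rounds any survivor spells the answer.
--     No rotation is materialised (or compared as a whole) until the end.
--     """
--     fwd = list(atom_indices)
--     rev = fwd[::-1]
--     n = len(fwd)
--     dbl = (fwd + fwd, rev + rev)
--     survivors = [(s, k) for s in (0, 1) for k in range(n)]
--     for t in range(n):
--         m = min(dbl[s][k + t] for (s, k) in survivors)
--         survivors = [(s, k) for (s, k) in survivors if dbl[s][k + t] == m]
--     s, k = survivors[0]
--     return tuple(dbl[s][k:k + n])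
-- ===== Notes on version B (the rewrite author's own statement) =====
-- stated objective: alternative
-- what changed: A materialises all 2n rotations of the ring and its reflection as tuples and takes min; B never compares whole rotations: it runs a position-wise elimination tournament over the 2n start positions (two doubled arrays), each round keeping only the start positions whose next element is minimal among the survivors, and reads the answer off the surviving start position after n rounds.
import Mathlib
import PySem

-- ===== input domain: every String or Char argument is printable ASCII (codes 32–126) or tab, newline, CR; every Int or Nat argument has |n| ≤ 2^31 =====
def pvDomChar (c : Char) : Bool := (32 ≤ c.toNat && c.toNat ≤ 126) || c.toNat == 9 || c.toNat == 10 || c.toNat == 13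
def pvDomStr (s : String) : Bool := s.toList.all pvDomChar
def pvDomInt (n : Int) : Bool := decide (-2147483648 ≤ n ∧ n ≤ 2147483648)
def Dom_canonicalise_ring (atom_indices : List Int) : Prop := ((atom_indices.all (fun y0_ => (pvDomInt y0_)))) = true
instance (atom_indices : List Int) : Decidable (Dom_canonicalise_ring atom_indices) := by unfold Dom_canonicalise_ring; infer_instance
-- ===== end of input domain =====

-- B replaces A's enumerate-all-rotations-and-min by a position-wise elimination
-- tournament over start positions; objective: alternative algorithm.

-- ===== PORT A =====
def canonicalise_ring (atom_indices : List Int) : List Int :=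
  let n : Int := atom_indices.length
  let fwd := atom_indices
  let rev := atom_indices.reverse
  let candidates : List (List Int) :=
    [fwd, rev].foldl (fun acc seq =>
      (PySem.List.pyRange 0 n 1).foldl
        (fun acc k =>
          acc ++ [PySem.List.slice seq (some k) none ++ PySem.List.slice seq none (some k)])
        acc) []
  (PySem.List.min? candidates (fun x => x)).getD []   -- min([]) raises: excluded by Pre_

-- ===== PORT B =====
-- Source B's dbl[s]: the doubled forward sequence for s = 0, the doubled reverse for s = 1
def pvDblB (xs : List Int) (s : Int) : List Int :=
  if s == 0 then xs ++ xs else xs.reverse ++ xs.reverse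

-- Source B's initial survivor list [(s, k) for s in (0, 1) for k in range(n)]
def pvInitB (xs : List Int) : List (Int × Int) :=
  [(0 : Int), 1].flatMap (fun s =>
    (PySem.List.pyRange 0 (xs.length : Int) 1).map (fun k => (s, k)))

-- one round of Source B's loop body: m = min of the column, keep the positions attaining it
def pvStepB (xs : List Int) (surv : List (Int × Int)) (t : Int) : List (Int × Int) :=
  let m := (PySem.List.min?
      (surv.map (fun p => PySem.List.pyGetD (pvDblB xs p.1) (p.2 + t) 0))
      (fun x => x)).getD 0
  surv.filter (fun p => PySem.List.pyGetD (pvDblB xs p.1) (p.2 + t) 0 == m)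

def canonicalise_ring_alt (atom_indices : List Int) : List Int :=
  let n : Int := atom_indices.length
  let survivors :=
    (PySem.List.pyRange 0 n 1).foldl (pvStepB atom_indices) (pvInitB atom_indices)
  match survivors with
  | [] => []   -- Python raises IndexError here (only reachable when the list is empty); excluded by Pre_
  | p :: _ => PySem.List.slice (pvDblB atom_indices p.1) (some p.2) (some (p.2 + n))

-- ===== PRECONDITION & SPEC =====
-- Python A raises ValueError (min of an empty sequence) on the empty list; excluded.
def Pre_canonicalise_ring (atom_indices : List Int) : Prop := atom_indices ≠ []
instance (atom_indices : List Int) : Decidable (Pre_canonicalise_ring atom_indices) := by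
  unfold Pre_canonicalise_ring; infer_instance

def pvWitness_canonicalise_ring : List Int := [2, 1, 3]

def Spec_canonicalise_ring (atom_indices : List Int) (out : List Int) : Prop :=
  out = canonicalise_ring_alt atom_indices
instance (atom_indices : List Int) (out : List Int) : Decidable (Spec_canonicalise_ring atom_indices out) := by
  unfold Spec_canonicalise_ring; infer_instance

-- ===== CLAIM (what is proved, stated in full; the proofs are below) =====
def Claim_equal_canonicalise_ring : Prop := ∀ (atom_indices : List Int), Dom_canonicalise_ring atom_indices → Pre_canonicalise_ring atom_indices → Spec_canonicalise_ring atom_indices (canonicalise_ring atom_indices)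

-- ===== LEMMAS AND PROOFS =====

-- rotation of s by k places
def pvRot (s : List Int) (k : Nat) : List Int := s.drop k ++ s.take k

-- all rotations of s, as A enumerates them
def pvRots (s : List Int) : List (List Int) :=
  (PySem.List.pyRange 0 (s.length : Int) 1).map (fun k => pvRot s k.toNat)

-- the rotation a start position (s, k) denotes
def pvCand (xs : List Int) (p : Int × Int) : List Int :=
  if p.1 == 0 then pvRot xs p.2.toNat else pvRot xs.reverse p.2.toNat

-- B's survivor fold re-indexed over Nat
def pvSurv (xs : List Int) (t : Nat) : List (Int × Int) :=
  (List.range t).foldl (fun s (k : Nat) => pvStepB xs s (k : Int)) (pvInitB xs)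

-- the tournament invariant after t rounds
def pvInv (xs : List Int) (t : Nat) (surv : List (Int × Int)) : Prop :=
  surv ≠ [] ∧ (∀ p ∈ surv, p ∈ pvInitB xs) ∧
  (∀ p ∈ surv, ∀ q ∈ pvInitB xs, (pvCand xs p).take t ≤ (pvCand xs q).take t) ∧
  (∀ p ∈ surv, ∀ q ∈ pvInitB xs, (pvCand xs q).take t = (pvCand xs p).take t → q ∈ surv)

-- the two DecidableLT instances on List Int are subsingleton-equal
lemma pv_min?_conv (xs : List (List Int)) :
    @PySem.List.min? (List Int) (List Int) List.instLT (fun a b => a.decidableLT b) xs (fun x => x)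
  = @PySem.List.min? (List Int) (List Int) List.instLinearOrder.toLT LinearOrder.toDecidableLT xs (fun x => x) := by
  congr 1

lemma pv_window (s : List Int) (k : Nat) (hk : k ≤ s.length) :
    ((s ++ s).drop k).take s.length = pvRot s k := by
  rw [List.drop_append_of_le_length hk, List.take_append]
  rw [List.take_of_length_le (by simp)]
  simp [pvRot]
  omega

lemma pv_A_cands (s : List Int) :
    ((PySem.List.pyRange 0 (s.length : Int) 1).map
      (fun k => PySem.List.slice s (some k) none ++ PySem.List.slice s none (some k))) = pvRots s := by
  apply List.map_congr_left
  intro k hk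
  have h := (PySem.List.mem_pyRange_one).mp hk
  rw [PySem.List.slice_from s h.1, PySem.List.slice_to s h.1]
  rfl

lemma pv_mem_init (xs : List Int) (p : Int × Int) :
    p ∈ pvInitB xs ↔ (p.1 = 0 ∨ p.1 = 1) ∧ 0 ≤ p.2 ∧ p.2 < (xs.length : Int) := by
  cases p with
  | mk s k =>
    simp [pvInitB, PySem.List.mem_pyRange_one]
    constructor
    · rintro (⟨h1, h2, h3⟩ | ⟨h1, h2, h3⟩) <;> simp_all
    · rintro ⟨h1 | h1, h2, h3⟩ <;> simp_all

lemma pv_cand_length (xs : List Int) (p : Int × Int) :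
    (pvCand xs p).length = xs.length := by
  unfold pvCand pvRot
  split <;> simp <;> omega

lemma pv_col_seq (seq : List Int) (k : Int) (hk0 : 0 ≤ k) (hkn : k < (seq.length : Int))
    (t : Nat) (ht : t < seq.length) :
    PySem.List.pyGetD (seq ++ seq) (k + (t : Int)) 0 = (pvRot seq k.toNat).getD t 0 := by
  have hlt : k + (t : Int) < ((seq ++ seq).length : Int) := by simp; omega
  rw [PySem.List.pyGetD_eq_getElem _ _ (by omega) hlt]
  rw [← pv_window seq k.toNat (by omega)]
  rw [List.getD_eq_getElem _ _ (by simp; omega)]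
  rw [List.getElem_take, List.getElem_drop]
  congr 1
  omega

lemma pv_col (xs : List Int) (p : Int × Int) (hp : p ∈ pvInitB xs) (t : Nat)
    (ht : t < xs.length) :
    PySem.List.pyGetD (pvDblB xs p.1) (p.2 + (t : Int)) 0 = (pvCand xs p).getD t 0 := by
  obtain ⟨hs, hk0, hkn⟩ := (pv_mem_init xs p).mp hp
  rcases hs with hs | hs
  · rw [show pvDblB xs p.1 = xs ++ xs by simp [pvDblB, hs],
        show pvCand xs p = pvRot xs p.2.toNat by simp [pvCand, hs]]
    exact pv_col_seq xs p.2 hk0 hkn t ht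
  · rw [show pvDblB xs p.1 = xs.reverse ++ xs.reverse by simp [pvDblB, hs],
        show pvCand xs p = pvRot xs.reverse p.2.toNat by simp [pvCand, hs]]
    exact pv_col_seq xs.reverse p.2 hk0 (by simpa using hkn) t (by simpa using ht)

lemma pv_slice_cand (xs : List Int) (p : Int × Int) (hp : p ∈ pvInitB xs) :
    PySem.List.slice (pvDblB xs p.1) (some p.2) (some (p.2 + (xs.length : Int)))
      = pvCand xs p := by
  obtain ⟨hs, hk0, hkn⟩ := (pv_mem_init xs p).mp hp
  rcases hs with hs | hs
  · rw [show pvDblB xs p.1 = xs ++ xs by simp [pvDblB, hs],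
        show pvCand xs p = pvRot xs p.2.toNat by simp [pvCand, hs]]
    rw [PySem.List.slice_toNat _ hk0 (by omega)]
    rw [show ((p.2 + (xs.length : Int)).toNat - p.2.toNat) = xs.length by omega]
    exact pv_window xs p.2.toNat (by omega)
  · rw [show pvDblB xs p.1 = xs.reverse ++ xs.reverse by simp [pvDblB, hs],
        show pvCand xs p = pvRot xs.reverse p.2.toNat by simp [pvCand, hs]]
    rw [PySem.List.slice_toNat _ hk0 (by omega)]
    rw [show ((p.2 + (xs.length : Int)).toNat - p.2.toNat) = xs.reverse.length by
      simp only [List.length_reverse]; omega]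
    exact pv_window xs.reverse p.2.toNat (by simp only [List.length_reverse]; omega)

-- lex order: a strict prefix difference decides any extension
lemma pv_lt_append (a : List Int) : ∀ (b u v : List Int),
    a.length = b.length → a < b → a ++ u < b ++ v := by
  induction a with
  | nil =>
      intro b u v h hlt
      rw [List.length_nil] at h
      obtain rfl : b = [] := (List.length_eq_zero_iff.mp h.symm)
      exact absurd hlt (lt_irrefl _)
  | cons x a ih =>
      intro b u v h hlt
      cases b with
      | nil => simp at h
      | cons y b =>
          rw [List.cons_lt_cons_iff] at hlt
          simp only [List.cons_append, List.cons_lt_cons_iff]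
          rcases hlt with hxy | ⟨rfl, htail⟩
          · exact Or.inl hxy
          · exact Or.inr ⟨rfl, ih b u v (by simpa using h) htail⟩

lemma pv_le_append_singleton (a : List Int) (x y : Int) (h : x ≤ y) :
    a ++ [x] ≤ a ++ [y] := by
  induction a with
  | nil =>
      rcases lt_or_eq_of_le h with hlt | rfl
      · exact le_of_lt (List.cons_lt_cons_iff.mpr (Or.inl hlt))
      · exact le_refl _
  | cons c a ih =>
      simp only [List.cons_append]
      rcases lt_or_eq_of_le ih with hlt | heq
      · exact le_of_lt (List.cons_lt_cons_iff.mpr (Or.inr ⟨rfl, hlt⟩))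
      · rw [heq]

lemma pv_take_succ (l : List Int) (t : Nat) (ht : t < l.length) :
    l.take (t + 1) = l.take t ++ [l.getD t 0] := by
  rw [List.take_add_one, List.getElem?_eq_getElem ht, List.getD_eq_getElem _ _ ht]
  rfl

lemma pv_inv_zero (xs : List Int) (hxs : xs ≠ []) : pvInv xs 0 (pvInitB xs) := by
  have h0 : ((0 : Int), (0 : Int)) ∈ pvInitB xs := by
    rw [pv_mem_init]
    refine ⟨Or.inl rfl, le_refl _, ?_⟩
    have := List.length_pos_of_ne_nil hxs
    omega
  exact ⟨List.ne_nil_of_mem h0, fun p hp => hp,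
    fun p _ q _ => by simp, fun p hp q hq _ => hq⟩

lemma pv_inv_step (xs : List Int) (t : Nat) (ht : t < xs.length)
    (surv : List (Int × Int)) (h : pvInv xs t surv) :
    pvInv xs (t + 1) (pvStepB xs surv (t : Int)) := by
  obtain ⟨hne, hsub, hmin, hcomp⟩ := h
  have hmapne : surv.map (fun p => PySem.List.pyGetD (pvDblB xs p.1) (p.2 + (t : Int)) 0) ≠ [] := by
    simpa using hne
  obtain ⟨m0, hm0⟩ := Option.ne_none_iff_exists'.mp
    (fun hh => hmapne ((PySem.List.min?_eq_none_iff
      (surv.map (fun p => PySem.List.pyGetD (pvDblB xs p.1) (p.2 + (t : Int)) 0))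
      (fun x : Int => x)).mp hh))
  obtain ⟨p0, hp0s, hp0⟩ := List.mem_map.mp (PySem.List.min?_mem hm0)
  have hmle : ∀ p ∈ surv, m0 ≤ PySem.List.pyGetD (pvDblB xs p.1) (p.2 + (t : Int)) 0 :=
    fun p hp => PySem.List.min?_isMin hm0 _ (List.mem_map_of_mem hp)
  unfold pvStepB
  rw [hm0]
  simp only [Option.getD_some]
  have hlen : ∀ q, t < (pvCand xs q).length := by
    intro q; rw [pv_cand_length]; exact ht
  refine ⟨List.ne_nil_of_mem (List.mem_filter.mpr ⟨hp0s, by simp [hp0]⟩),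
    fun p hp => hsub p (List.mem_filter.mp hp).1, ?_, ?_⟩
  · intro p hpf q hq
    obtain ⟨hps, hpcolb⟩ := List.mem_filter.mp hpf
    have hpcol : PySem.List.pyGetD (pvDblB xs p.1) (p.2 + (t : Int)) 0 = m0 := by
      simpa using hpcolb
    have hpI := hsub p hps
    rw [pv_take_succ _ t (hlen p), pv_take_succ _ t (hlen q)]
    rcases lt_or_eq_of_le (hmin p hps q hq) with hlt | heq
    · refine le_of_lt (pv_lt_append _ _ _ _ ?_ hlt)
      simp only [List.length_take]
      have := hlen p; have := hlen q
      omega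
    · have hqs : q ∈ surv := hcomp p hps q hq heq.symm
      rw [heq]
      rw [← pv_col xs p hpI t ht, ← pv_col xs q hq t ht]
      exact pv_le_append_singleton _ _ _ (hpcol ▸ hmle q hqs)
  · intro p hpf q hq heq
    obtain ⟨hps, hpcolb⟩ := List.mem_filter.mp hpf
    have hpcol : PySem.List.pyGetD (pvDblB xs p.1) (p.2 + (t : Int)) 0 = m0 := by
      simpa using hpcolb
    have hpI := hsub p hps
    rw [pv_take_succ _ t (hlen q), pv_take_succ _ t (hlen p)] at heq
    have hinj := List.append_inj' heq rfl
    have hqs : q ∈ surv := hcomp p hps q hq hinj.1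
    have hval : (pvCand xs q).getD t 0 = (pvCand xs p).getD t 0 := by
      have := hinj.2; simpa using this
    refine List.mem_filter.mpr ⟨hqs, ?_⟩
    rw [pv_col xs q hq t ht, hval, ← pv_col xs p hpI t ht, hpcol]
    simp

lemma pv_inv_surv (xs : List Int) (hxs : xs ≠ []) (t : Nat) (ht : t ≤ xs.length) :
    pvInv xs t (pvSurv xs t) := by
  induction t with
  | zero => exact pv_inv_zero xs hxs
  | succ t ih =>
      have hstep : pvSurv xs (t + 1) = pvStepB xs (pvSurv xs t) (t : Int) := by
        simp [pvSurv, List.range_succ]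
      rw [hstep]
      exact pv_inv_step xs t (by omega) _ (ih (by omega))

lemma pv_cands_decomp (xs : List Int) :
    pvRots xs ++ pvRots xs.reverse = (pvInitB xs).map (pvCand xs) := by
  simp only [pvInitB, List.flatMap_cons, List.flatMap_nil, List.append_nil,
    List.map_append, List.map_map, pvRots, List.length_reverse]
  congr 1

-- ===== VERDICT (by name: the statement is the Claim_ definition above) =====
theorem canonicalise_ring_spec : Claim_equal_canonicalise_ring := by
  intro xs _ hpre
  have hn : 0 < xs.length := List.length_pos_of_ne_nil hpre
  unfold Spec_canonicalise_ring canonicalise_ring canonicalise_ring_alt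
  simp only [List.foldl_cons, List.foldl_nil,
    PySem.List.foldl_append_singleton_eq_map, List.nil_append]
  rw [pv_A_cands xs]
  rw [show (PySem.List.pyRange 0 (xs.length : Int) 1).map
      (fun k => PySem.List.slice xs.reverse (some k) none ++ PySem.List.slice xs.reverse none (some k))
    = pvRots xs.reverse by rw [← List.length_reverse (as := xs)]; exact pv_A_cands xs.reverse]
  rw [pv_cands_decomp xs]
  have hfold : (PySem.List.pyRange 0 ((xs.length : Int)) 1).foldl (pvStepB xs) (pvInitB xs)
      = pvSurv xs xs.length := by
    rw [PySem.List.pyRange_one]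
    simp only [Int.sub_zero, Int.toNat_natCast, List.foldl_map, zero_add, pvSurv]
  rw [hfold]
  obtain ⟨hne, hsub, hmin, hcomp⟩ := pv_inv_surv xs hpre xs.length (le_refl _)
  cases hsv : pvSurv xs xs.length with
  | nil => exact absurd hsv hne
  | cons p rest =>
    dsimp only
    have hpS : p ∈ pvSurv xs xs.length := by rw [hsv]; exact List.mem_cons_self
    have hpI : p ∈ pvInitB xs := hsub p hpS
    rw [pv_slice_cand xs p hpI]
    have hcne : (pvInitB xs).map (pvCand xs) ≠ [] := by
      simp only [ne_eq, List.map_eq_nil_iff]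
      exact List.ne_nil_of_mem hpI
    obtain ⟨v, hv⟩ := Option.ne_none_iff_exists'.mp
      (fun hh => hcne ((PySem.List.min?_eq_none_iff
        ((pvInitB xs).map (pvCand xs)) (fun x : List Int => x)).mp hh))
    rw [hv]
    simp only [Option.getD_some]
    obtain ⟨q, hq, hqv⟩ := List.mem_map.mp (PySem.List.min?_mem hv)
    have htake : ∀ r, r ∈ pvInitB xs → (pvCand xs r).take xs.length = pvCand xs r := by
      intro r _; exact List.take_of_length_le (le_of_eq (pv_cand_length xs r))
    apply le_antisymm
    · exact PySem.List.min?_isMin (key := fun x => x)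
        (pv_min?_conv _ ▸ hv) _ (List.mem_map_of_mem hpI)
    · calc v = pvCand xs q := hqv.symm
        _ ≥ pvCand xs p := by
            rw [← htake p hpI, ← htake q hq]
            exact hmin p hpS q hq
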